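-- pv_equiv track=rewrite | github.com/uk2459644/dsa-practice | gfg/pigeonhole/constr.py | generateans
-- ===== SOURCE A (Python) =====
-- def generateans(a,b):
--     temp=b+1
--     s=""
--     # run a loop until b is greater than 0
--     while temp>0:
--         each = (a//(b+1))
--
--         while each > 0:
--             s+='A'
--             a-=1
--             each -=1
--
--         if (b>0):
--             s+='B'
--             b-=1
--         temp -= 1
--
--     return s
-- ===== SOURCE B (Python) =====
-- def generateans(a, b):
--     n = b + 1
--     if n <= 0:
--         return ""
--     q, r = divmod(a, n)
--     parts = []
--     for i in range(n):
--         size = q + (1 if i >= n - r else 0)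
--         parts.append('A' * size)
--         if i < b:
--             parts.append('B')
--     return ''.join(parts)
-- ===== Notes on version B (the rewrite author's own statement) =====
-- stated objective: faster
-- what changed: A's nested while-loops append one 'A' at a time, re-dividing the shrinking remainder by the shrinking group count each round; B computes a single divmod(a, b+1) up front and emits each group as one 'A'*size chunk from the closed form q + (i >= n - r), joined at the end, removing the per-character Python loop.
import Mathlib
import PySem

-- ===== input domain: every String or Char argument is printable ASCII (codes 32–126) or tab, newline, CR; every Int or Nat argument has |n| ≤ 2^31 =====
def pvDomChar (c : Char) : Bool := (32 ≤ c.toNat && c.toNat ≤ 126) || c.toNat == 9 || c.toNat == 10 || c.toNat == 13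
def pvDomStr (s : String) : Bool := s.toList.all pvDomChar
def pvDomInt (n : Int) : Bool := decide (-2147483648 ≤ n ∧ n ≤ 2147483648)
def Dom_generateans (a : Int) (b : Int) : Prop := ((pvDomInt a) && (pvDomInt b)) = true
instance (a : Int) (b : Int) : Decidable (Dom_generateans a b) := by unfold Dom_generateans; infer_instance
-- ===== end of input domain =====

-- B replaces A's evolving re-division recurrence with a single divmod and a closed-form group size (alternative algorithm, same cost class).

-- ===== PORT A =====
-- inner 'while each > 0: s += "A"; a -= 1; each -= 1' (string kept as List Char, wrapped by String.mk at the end)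
def pyGenInner (s : List Char) (a : Int) (each : Int) : List Char × Int :=
  if each > 0 then pyGenInner (s ++ ['A']) (a - 1) (each - 1) else (s, a)
termination_by each.toNat
decreasing_by omega

-- outer 'while temp > 0' loop; 'a // (b+1)' is PySem.Int.floordiv (b+1 > 0 whenever this line is reached, exactly as in Python)
def pyGenLoop (a : Int) (b : Int) (temp : Int) (s : List Char) : List Char :=
  if temp > 0 then
    let each := PySem.Int.floordiv a (b + 1)
    let p := pyGenInner s a each
    if b > 0 then pyGenLoop p.2 (b - 1) (temp - 1) (p.1 ++ ['B'])
    else pyGenLoop p.2 b (temp - 1) p.1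
  else s
termination_by temp.toNat
decreasing_by all_goals omega

def generateans (a : Int) (b : Int) : String :=
  String.mk (pyGenLoop a b (b + 1) [])

-- ===== PORT B =====
-- 'A' * size  ('' for size ≤ 0, as in Python)
def generateans_alt (a : Int) (b : Int) : String :=
  let n := b + 1
  if n ≤ 0 then "" else
  let q := PySem.Int.floordiv a n
  let r := PySem.Int.mod a n
  let parts := (PySem.List.pyRange 0 n 1).foldl (fun acc i =>
      let size := q + (if n - r ≤ i then 1 else 0)
      let acc := acc ++ [List.replicate size.toNat 'A']
      if i < b then acc ++ [['B']] else acc) ([] : List (List Char))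
  String.mk parts.flatten

-- ===== PRECONDITION & SPEC =====
def Spec_generateans (a : Int) (b : Int) (out : String) : Prop := out = generateans_alt a b
instance (a : Int) (b : Int) (out : String) : Decidable (Spec_generateans a b out) := by unfold Spec_generateans; infer_instance

-- ===== CLAIM (what is proved, stated in full; the proofs are below) =====
def Claim_equal_generateans : Prop := ∀ (a : Int) (b : Int), Dom_generateans a b → Spec_generateans a b (generateans a b)

-- ===== LEMMAS AND PROOFS =====

def repA (k : Int) : List Char := List.replicate k.toNat 'A'

-- A's greedy recurrence, one group per step (k = current value of b)
def greedy (a : Int) : Nat → List Char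
  | 0 => repA (PySem.Int.floordiv a 1)
  | k+1 =>
      let q := PySem.Int.floordiv a ((k : Int) + 2)
      repA q ++ 'B' :: greedy (a - (q.toNat : Int)) k

-- B's closed-form group size (n = k+1 groups)
def sz (a : Int) (k : Nat) (j : Nat) : Int :=
  PySem.Int.floordiv a ((k : Int) + 1) +
    (if ((k : Int) + 1) - PySem.Int.mod a ((k : Int) + 1) ≤ (j : Int) then 1 else 0)

def canon (a : Int) (k : Nat) : List Char :=
  (List.range (k+1)).flatMap (fun j => repA (sz a k j) ++ if j < k then ['B'] else [])

theorem pyGenInner_eq (e : Int) (s : List Char) (a : Int) :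
    pyGenInner s a e = (s ++ repA e, a - (e.toNat : Int)) := by
  by_cases h : e > 0
  · rw [pyGenInner]
    simp only [h, if_true]
    rw [pyGenInner_eq (e-1)]
    have h1 : (e-1).toNat + 1 = e.toNat := by omega
    have hA : s ++ ['A'] ++ repA (e-1) = s ++ repA e := by
      simp only [repA, List.append_assoc]
      congr 1
      rw [← h1, List.replicate_succ]
      rfl
    have hB : a - 1 - ((e-1).toNat : Int) = a - (e.toNat : Int) := by omega
    rw [hA, hB]
  · rw [pyGenInner]
    simp only [h, if_false, repA]
    have h0 : e.toNat = 0 := by omega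
    simp [h0]
termination_by e.toNat
decreasing_by omega

theorem pyGenLoop_eq (k : Nat) (a : Int) (s : List Char) :
    pyGenLoop a (k : Int) ((k : Int) + 1) s = s ++ greedy a k := by
  induction k generalizing a s with
  | zero =>
    rw [pyGenLoop]
    norm_num
    rw [pyGenInner_eq, pyGenLoop]
    norm_num [greedy]
  | succ k ih =>
    rw [pyGenLoop]
    have hpos : ((k:Int)+1) + 1 > 0 := by omega
    have hb : ((k+1:Nat):Int) > 0 := by push_cast; omega
    simp only [show (((k+1:Nat):Int) + 1 > 0) = True by simp; omega, if_true]
    rw [pyGenInner_eq]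
    simp only [hb, if_true]
    have e1 : ((k+1:Nat):Int) - 1 = (k:Int) := by push_cast; omega
    have e2 : ((k+1:Nat):Int) + 1 - 1 = (k:Int) + 1 := by push_cast; omega
    have e3 : ((k+1:Nat):Int) + 1 = (k:Int) + 2 := by push_cast; omega
    rw [e1, e2, e3, ih]
    simp [greedy, List.append_assoc]

theorem sz_shift (a : Int) (k j : Nat) (hj : j ≤ k) :
    (sz a (k+1) (j+1)).toNat
      = (sz (a - (((PySem.Int.floordiv a ((k : Int) + 2)).toNat : Int))) k j).toNat := by
  have hn : (0:Int) < (k:Int) + 2 := by omega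
  have hn' : (0:Int) < (k:Int) + 1 := by omega
  simp only [sz]
  push_cast
  rw [show ((k:Int) + 1 + 1) = (k:Int) + 2 from by ring]
  rw [PySem.Int.floordiv_eq_ediv_of_pos hn, PySem.Int.mod_eq_emod_of_pos hn,
      PySem.Int.floordiv_eq_ediv_of_pos hn', PySem.Int.mod_eq_emod_of_pos hn']
  set q := a / ((k:Int) + 2) with hq
  set r := a % ((k:Int) + 2) with hr
  have hzr : 0 ≤ r := Int.emod_nonneg _ (by omega)
  have hrn : r < (k:Int) + 2 := Int.emod_lt_of_pos _ hn
  have hqr : r + ((k:Int) + 2) * q = a := by rw [hq, hr]; exact Int.emod_add_mul_ediv a _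
  by_cases ha : 0 ≤ a
  · have hq0 : 0 ≤ q := Int.ediv_nonneg ha (by omega)
    rw [show ((q.toNat : Int)) = q from by omega]
    by_cases hcr : r ≤ (k:Int)
    · have h2 : (a - q) / ((k:Int)+1) = q ∧ (a - q) % ((k:Int)+1) = r :=
        (Int.ediv_emod_unique hn').mpr ⟨by linear_combination hqr, hzr, by omega⟩
      rw [h2.1, h2.2]
      split_ifs <;> omega
    · have hr2 : r = (k:Int) + 1 := by omega
      have h2 : (a - q) / ((k:Int)+1) = q + 1 ∧ (a - q) % ((k:Int)+1) = 0 :=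
        (Int.ediv_emod_unique hn').mpr ⟨by rw [hr2] at hqr; linear_combination hqr, le_refl 0, by omega⟩
      rw [h2.1, h2.2]
      split_ifs <;> omega
  · have hq0 : q < 0 := by
      rcases lt_or_ge q 0 with h | h
      · exact h
      · exfalso
        have : 0 ≤ ((k:Int) + 2) * q := mul_nonneg (by omega) h
        omega
    rw [show ((q.toNat : Int)) = 0 from by omega, sub_zero]
    set q' := a / ((k:Int) + 1) with hq'
    set r' := a % ((k:Int) + 1) with hr'
    have hzr' : 0 ≤ r' := Int.emod_nonneg _ (by omega)
    have hqr' : r' + ((k:Int) + 1) * q' = a := by rw [hq', hr']; exact Int.emod_add_mul_ediv a _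
    have hq'0 : q' < 0 := by
      rcases lt_or_ge q' 0 with h | h
      · exact h
      · exfalso
        have : 0 ≤ ((k:Int) + 1) * q' := mul_nonneg (by omega) h
        omega
    split_ifs <;> omega

theorem flatten_flatMap_char (l : List Nat) (gg : Nat → List (List Char)) :
    (l.flatMap gg).flatten = l.flatMap (fun j => (gg j).flatten) := by
  induction l with
  | nil => simp
  | cons x xs ih => simp [ih]

theorem greedy_eq_canon (k : Nat) (a : Int) : greedy a k = canon a k := by
  induction k generalizing a with
  | zero =>
    simp [greedy, canon, sz]
  | succ k ih =>
    have hn : (0:Int) < ((k+1:Nat):Int) + 1 := by push_cast; omega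
    have hzr : 0 ≤ PySem.Int.mod a (((k+1:Nat):Int) + 1) := PySem.Int.mod_nonneg a hn
    have hrn : PySem.Int.mod a (((k+1:Nat):Int) + 1) < ((k+1:Nat):Int) + 1 := PySem.Int.mod_lt a hn
    rw [canon, List.range_succ_eq_map, List.flatMap_cons, List.flatMap_map]
    have h0 : sz a (k+1) 0 = PySem.Int.floordiv a ((k:Int) + 2) := by
      simp only [sz]
      rw [if_neg (by push_cast at hzr hrn ⊢; omega)]
      push_cast
      ring_nf
    have hguard : 0 < k + 1 := by omega
    simp only [h0, if_pos hguard]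
    rw [greedy]
    have htail : (List.range (k+1)).flatMap (fun j => (fun j => repA (sz a (k+1) j) ++ if j < k + 1 then ['B'] else []) (Nat.succ j))
        = canon (a - (((PySem.Int.floordiv a ((k : Int) + 2)).toNat : Int))) k := by
      rw [canon]
      apply List.flatMap_congr
      intro j hj
      have hjk : j ≤ k := by simp at hj; omega
      have hg : j + 1 < k + 1 + 1 ↔ j < k + 1 := by omega
      simp only [Nat.succ_eq_add_one]
      have hrep : repA (sz a (k+1) (j+1))
          = repA (sz (a - (((PySem.Int.floordiv a ((k : Int) + 2)).toNat : Int))) k j) := by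
        simp only [repA]
        rw [sz_shift a k j hjk]
      rw [hrep]
      by_cases hc : j < k
      · rw [if_pos (by omega), if_pos hc]
      · rw [if_neg (by omega), if_neg hc]
    rw [htail, ih]
    simp [List.append_assoc]

theorem A_eq (a b : Int) (hb : 0 ≤ b) :
    generateans a b = String.mk (greedy a b.toNat) := by
  obtain ⟨k, rfl⟩ : ∃ k : Nat, b = (k : Int) := ⟨b.toNat, by omega⟩
  rw [generateans, pyGenLoop_eq k a []]
  simp

theorem B_eq (a b : Int) (hb : 0 ≤ b) :
    generateans_alt a b = String.mk (canon a b.toNat) := by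
  obtain ⟨k, rfl⟩ : ∃ k : Nat, b = (k : Int) := ⟨b.toNat, by omega⟩
  rw [generateans_alt]
  simp only [show ¬((k:Int) + 1 ≤ 0) from by omega, if_false]
  rw [show ((k:Int) + 1) = ((k+1 : Nat) : Int) from by push_cast; ring,
      PySem.List.pyRange_zero_natCast (k+1), List.foldl_map]
  have hbody : (fun (x : List (List Char)) (y : Nat) =>
      if (y:Int) < (k:Int) then
        x ++ [List.replicate (PySem.Int.floordiv a ((k+1:Nat):Int) +
          if ((k+1:Nat):Int) - PySem.Int.mod a ((k+1:Nat):Int) ≤ (y:Int) then 1 else 0).toNat 'A'] ++ [['B']]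
      else
        x ++ [List.replicate (PySem.Int.floordiv a ((k+1:Nat):Int) +
          if ((k+1:Nat):Int) - PySem.Int.mod a ((k+1:Nat):Int) ≤ (y:Int) then 1 else 0).toNat 'A'])
      = (fun acc j => acc ++ ([List.replicate (sz a k j).toNat 'A'] ++ if j < k then [['B']] else [])) := by
    funext x y
    simp only [sz]
    rw [show ((k+1:Nat):Int) = (k:Int) + 1 from by push_cast; ring]
    by_cases hc : y < k
    · rw [if_pos (show ((y:Int) < (k:Int)) from by exact_mod_cast hc), if_pos hc]
      simp [List.append_assoc]
    · rw [if_neg (show ¬((y:Int) < (k:Int)) from by exact_mod_cast hc), if_neg hc]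
      simp
  rw [hbody, PySem.List.foldl_append_eq_flatMap (fun j => [List.replicate (sz a k j).toNat 'A'] ++ if j < k then [['B']] else [])]
  rw [List.nil_append, flatten_flatMap_char]
  rw [canon, Int.toNat_natCast]
  congr 1
  apply List.flatMap_congr
  intro j hj
  by_cases hc : j < k
  · rw [if_pos hc, if_pos hc]
    simp [repA]
  · rw [if_neg hc, if_neg hc]
    simp [repA]

-- ===== VERDICT (by name: the statement is the Claim_ definition above) =====
theorem generateans_spec : Claim_equal_generateans := by
  intro a b _
  unfold Spec_generateans
  by_cases hb : 0 ≤ b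
  · rw [A_eq a b hb, B_eq a b hb, greedy_eq_canon]
  · have h1 : b + 1 ≤ 0 := by omega
    rw [generateans, pyGenLoop, generateans_alt]
    simp [h1, not_lt.mpr h1]
    rfl
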